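-- pv_equiv track=rewrite | github.com/AidanPolese/ParticipationAnalysis | Extract-Information.py | buildTopicCounts
-- ===== SOURCE A (Python) =====
-- def buildTopicCounts(discussions, wordPairs, wordTriples):
--     # build dictionary to hold all keywords, and key phrases made by students
--     outDict = {}
--     for week in discussions:
--         for postPerson in discussions[week]:
--             person = postPerson[5:]
--             if person.endswith(('-2', '-3')):
--                 person = person[:-2]
--             if person not in outDict:
--                 outDict[person] = {}
--     for person in outDict:
--         for wordPairTuple in wordPairs:
--             wordPair = wordPairTuple[0]
--             outDict[person][wordPair] = 0
--         for wordTripleTuple in wordTriples: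
--             wordTriple = wordTripleTuple[0]
--             outDict[person][wordTriple] = 0
--     return outDict
-- ===== SOURCE B (Python) =====
-- def _firstOccurrences(xs):
--     # remove-later-duplicates dedup: keep the head, filter its later copies out, repeat
--     out = []
--     while xs:
--         head = xs[0]
--         out.append(head)
--         xs = [x for x in xs[1:] if x != head]
--     return out
--
-- def buildTopicCounts(discussions, wordPairs, wordTriples):
--     # stream of all normalized poster names, with repetitions, in posting order
--     names = []
--     for week in discussions:
--         for postPerson in discussions[week]:
--             person = postPerson[5:]
--             if person.endswith(('-2', '-3')):
--                 person = person[:-2]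
--             names.append(person)
--     # one shared zero-count template, built as an items list from the deduped key stream
--     template = [(key, 0)
--                 for key in _firstOccurrences([t[0] for t in wordPairs] + [t[0] for t in wordTriples])]
--     return {person: dict(template) for person in _firstOccurrences(names)}
-- ===== Notes on version B (the rewrite author's own statement) =====
-- stated objective: alternative
-- what changed: B collects the raw normalized-name stream and the raw key stream first, dedups each with a remove-later-duplicates repeated-filter pass instead of A's membership-checked dict accumulation, and builds one shared zero-count items template instead of A's per-person rescans of wordPairs/wordTriples.
import Mathlib
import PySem

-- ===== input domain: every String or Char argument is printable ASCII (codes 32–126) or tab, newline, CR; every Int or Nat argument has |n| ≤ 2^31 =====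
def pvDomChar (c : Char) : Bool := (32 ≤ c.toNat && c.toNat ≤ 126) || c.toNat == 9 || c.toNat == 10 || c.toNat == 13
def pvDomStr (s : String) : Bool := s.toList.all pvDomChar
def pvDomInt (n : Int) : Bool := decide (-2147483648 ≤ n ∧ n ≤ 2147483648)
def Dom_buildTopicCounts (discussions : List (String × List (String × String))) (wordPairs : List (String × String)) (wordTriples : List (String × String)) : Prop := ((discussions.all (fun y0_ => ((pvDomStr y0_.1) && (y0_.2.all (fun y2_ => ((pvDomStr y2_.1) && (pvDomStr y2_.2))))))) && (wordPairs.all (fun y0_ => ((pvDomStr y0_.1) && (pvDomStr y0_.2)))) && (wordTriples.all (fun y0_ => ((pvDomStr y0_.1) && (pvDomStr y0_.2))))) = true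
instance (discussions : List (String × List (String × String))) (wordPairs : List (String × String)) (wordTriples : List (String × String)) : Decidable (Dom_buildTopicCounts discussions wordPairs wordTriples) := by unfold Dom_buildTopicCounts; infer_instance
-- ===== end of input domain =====

-- B replaces A's membership-checked accumulation and per-person key rescans by a
-- remove-later-duplicates dedup over flattened streams and one shared zero template;
-- objective: alternative (same cost class, no speed claim).

-- ===== PORT A =====
def buildTopicCounts (discussions : List (String × List (String × String))) (wordPairs : List (String × String)) (wordTriples : List (String × String)) : List (String × List (String × Int)) :=
  -- first loop: collect the (ordered, distinct) normalized person keys of outDict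
  let outKeys : List String := discussions.foldl (fun out week =>
      week.2.foldl (fun out postPerson =>
        let person := PySem.Str.slice postPerson.1 (some 5) none
        let person := if PySem.Str.endswith person "-2" || PySem.Str.endswith person "-3"
                      then PySem.Str.slice person none (some (-2)) else person
        if out.contains person then out else out ++ [person]) out) []
  -- second loop: for each person, fill its (fresh, initially empty) inner dict with zeros
  outKeys.map (fun person =>
    (person,
      (wordTriples.foldl (fun d t => d.insert t.1 (0 : Int))
        (wordPairs.foldl (fun d t => d.insert t.1 (0 : Int))
          (PySem.Dict.empty : PySem.Dict String Int))).items))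

-- ===== PORT B =====
-- remove-later-duplicates dedup: keep the head, filter its later copies out, repeat
def firstOccurrences : List String → List String
  | [] => []
  | h :: t => h :: firstOccurrences (t.filter (fun x => x != h))
termination_by l => l.length
decreasing_by simpa using Nat.lt_succ_of_le (List.length_filter_le _ t)

def buildTopicCounts_alt (discussions : List (String × List (String × String))) (wordPairs : List (String × String)) (wordTriples : List (String × String)) : List (String × List (String × Int)) :=
  -- stream of all normalized poster names, with repetitions, in posting order
  let names : List String := discussions.foldl (fun acc week =>
      week.2.foldl (fun acc postPerson =>
        let person := PySem.Str.slice postPerson.1 (some 5) none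
        let person := if PySem.Str.endswith person "-2" || PySem.Str.endswith person "-3"
                      then PySem.Str.slice person none (some (-2)) else person
        acc ++ [person]) acc) []
  -- one shared zero-count template, built as an items list from the deduped key stream
  let template : List (String × Int) :=
    (firstOccurrences ((wordPairs.map Prod.fst) ++ (wordTriples.map Prod.fst))).map (fun key => (key, 0))
  (firstOccurrences names).map (fun person => (person, template))

-- ===== PRECONDITION & SPEC =====
def Spec_buildTopicCounts (discussions : List (String × List (String × String))) (wordPairs : List (String × String)) (wordTriples : List (String × String)) (out : List (String × List (String × Int))) : Prop := out = buildTopicCounts_alt discussions wordPairs wordTriples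
instance (discussions : List (String × List (String × String))) (wordPairs : List (String × String)) (wordTriples : List (String × String)) (out : List (String × List (String × Int))) : Decidable (Spec_buildTopicCounts discussions wordPairs wordTriples out) := by unfold Spec_buildTopicCounts; infer_instance

-- ===== CLAIM (what is proved, stated in full; the proofs are below) =====
def Claim_equal_buildTopicCounts : Prop := ∀ (discussions : List (String × List (String × String))) (wordPairs : List (String × String)) (wordTriples : List (String × String)), Dom_buildTopicCounts discussions wordPairs wordTriples → Spec_buildTopicCounts discussions wordPairs wordTriples (buildTopicCounts discussions wordPairs wordTriples)

-- ===== LEMMAS AND PROOFS =====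

-- A's membership-checked append fold computes firstOccurrences of the raw stream.
theorem foldl_contains_append_eq (l acc : List String) :
    l.foldl (fun out p => if out.contains p then out else out ++ [p]) acc
      = acc ++ firstOccurrences (l.filter (fun x => !(acc.contains x))) := by
  induction l generalizing acc with
  | nil => simp [firstOccurrences]
  | cons h t ih =>
    cases hc : acc.contains h with
    | true =>
      simp only [List.foldl_cons, List.filter_cons, hc, Bool.not_true, if_true,
        Bool.false_eq_true, if_false]
      exact ih acc
    | false =>
      simp only [List.foldl_cons, List.filter_cons, hc, Bool.not_false, if_true,
        Bool.false_eq_true, if_false]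
      rw [ih (acc ++ [h]), firstOccurrences]
      simp only [List.append_assoc, List.cons_append, List.nil_append, List.filter_filter]
      congr 3
      apply List.filter_congr
      intro x _
      by_cases hx : x = h
      · subst hx; simp
      · simp [hx, bne, beq_eq_decide]

-- A's constant-zero insert fold over a key list produces the deduped items list.
theorem items_foldl_insert_zero (ks : List String) (d : PySem.Dict String Int)
    (hz : ∀ p ∈ d.items, p.2 = (0 : Int)) :
    (ks.foldl (fun d k => d.insert k (0 : Int)) d).items
      = d.items ++ (firstOccurrences (ks.filter (fun k => !(d.contains k)))).map (fun k => (k, (0 : Int))) := by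
  induction ks generalizing d with
  | nil => simp [firstOccurrences]
  | cons k t ih =>
    cases hc : d.contains k with
    | true =>
      have hd : d.insert k (0 : Int) = d := by
        apply PySem.Dict.ext
        rw [PySem.Dict.items_insert_of_contains d (0 : Int) hc]
        have hpt : ∀ p ∈ d.items, (if (p.1 == k) = true then (k, (0 : Int)) else p) = p := by
          intro p hp
          by_cases hk : (p.1 == k) = true
          · have h1 : p.1 = k := by simpa using hk
            have h2 : p.2 = 0 := hz p hp
            simp only [hk, if_true]
            rw [← h1, ← h2]
          · simp [hk]
        exact (List.map_congr_left hpt).trans (List.map_id' _)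
      simp only [List.foldl_cons, List.filter_cons, hc, Bool.not_true, Bool.false_eq_true,
        if_false, hd]
      exact ih d hz
    | false =>
      have hitems := PySem.Dict.items_insert_of_not_contains d (0 : Int) hc
      have hz' : ∀ p ∈ (d.insert k (0 : Int)).items, p.2 = (0 : Int) := by
        intro p hp
        rw [hitems] at hp
        rcases List.mem_append.mp hp with h | h
        · exact hz p h
        · simp only [List.mem_singleton] at h
          subst h; rfl
      simp only [List.foldl_cons, List.filter_cons, hc, Bool.not_false, if_true]
      rw [ih _ hz', hitems, firstOccurrences]
      simp only [List.append_assoc, List.map_cons, List.cons_append, List.nil_append,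
        List.filter_filter]
      congr 4
      apply List.filter_congr
      intro x _
      rw [PySem.Dict.contains_insert]
      by_cases hx : x = k
      · subst hx; simp
      · simp [hx, bne, beq_eq_decide]

-- a nested per-week loop over normalized posters is the loop over the flattened stream
theorem nested_eq_flat {γ : Type} (g : γ → String → γ)
    (norm : String × String → String)
    (ds : List (String × List (String × String))) (acc : γ) :
    ds.foldl (fun out w => w.2.foldl (fun out pp => g out (norm pp)) out) acc
      = (ds.flatMap (fun w => w.2.map norm)).foldl g acc := by
  rw [List.foldl_flatMap]
  induction ds generalizing acc with
  | nil => rfl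
  | cons w ws ih => simp only [List.foldl_cons, List.foldl_map, ih]

theorem buildTopicCounts_eq_alt (discussions : List (String × List (String × String))) (wordPairs : List (String × String)) (wordTriples : List (String × String)) :
    buildTopicCounts discussions wordPairs wordTriples = buildTopicCounts_alt discussions wordPairs wordTriples := by
  have hkeys :
      discussions.foldl (fun out week =>
        week.2.foldl (fun out postPerson =>
          let person := PySem.Str.slice postPerson.1 (some 5) none
          let person := if PySem.Str.endswith person "-2" || PySem.Str.endswith person "-3"
                        then PySem.Str.slice person none (some (-2)) else person
          if out.contains person then out else out ++ [person]) out) ([] : List String)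
        = firstOccurrences (discussions.flatMap (fun w => w.2.map (fun pp =>
            let person := PySem.Str.slice pp.1 (some 5) none
            if PySem.Str.endswith person "-2" || PySem.Str.endswith person "-3"
            then PySem.Str.slice person none (some (-2)) else person))) := by
    refine Eq.trans (nested_eq_flat (fun out p => if out.contains p then out else out ++ [p])
      (fun pp =>
        let person := PySem.Str.slice pp.1 (some 5) none
        if PySem.Str.endswith person "-2" || PySem.Str.endswith person "-3"
        then PySem.Str.slice person none (some (-2)) else person)
      discussions ([] : List String)) ?_
    rw [foldl_contains_append_eq]
    simp only [List.contains_nil, Bool.not_false, List.filter_true, List.nil_append]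
  have hnames :
      discussions.foldl (fun acc week =>
        week.2.foldl (fun acc postPerson =>
          let person := PySem.Str.slice postPerson.1 (some 5) none
          let person := if PySem.Str.endswith person "-2" || PySem.Str.endswith person "-3"
                        then PySem.Str.slice person none (some (-2)) else person
          acc ++ [person]) acc) ([] : List String)
        = discussions.flatMap (fun w => w.2.map (fun pp =>
            let person := PySem.Str.slice pp.1 (some 5) none
            if PySem.Str.endswith person "-2" || PySem.Str.endswith person "-3"
            then PySem.Str.slice person none (some (-2)) else person)) := by
    refine Eq.trans (nested_eq_flat (fun acc p => acc ++ [p])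
      (fun pp =>
        let person := PySem.Str.slice pp.1 (some 5) none
        if PySem.Str.endswith person "-2" || PySem.Str.endswith person "-3"
        then PySem.Str.slice person none (some (-2)) else person)
      discussions ([] : List String)) ?_
    exact (PySem.List.foldl_append_singleton _ _).trans (List.nil_append _)
  have hdict :
      (wordTriples.foldl (fun d t => d.insert t.1 (0 : Int))
        (wordPairs.foldl (fun d t => d.insert t.1 (0 : Int))
          (PySem.Dict.empty : PySem.Dict String Int))).items
        = (firstOccurrences ((wordPairs.map Prod.fst) ++ (wordTriples.map Prod.fst))).map
            (fun key => (key, (0 : Int))) := by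
    have h1 : wordPairs.foldl (fun d t => d.insert t.1 (0 : Int))
          (PySem.Dict.empty : PySem.Dict String Int)
        = (wordPairs.map Prod.fst).foldl (fun d k => d.insert k (0 : Int))
          (PySem.Dict.empty : PySem.Dict String Int) :=
        (List.foldl_map (f := Prod.fst) (g := fun d k => d.insert k (0 : Int))
          (l := wordPairs) (init := (PySem.Dict.empty : PySem.Dict String Int))).symm
    have h2 : wordTriples.foldl (fun d t => d.insert t.1 (0 : Int))
          ((wordPairs.map Prod.fst).foldl (fun d k => d.insert k (0 : Int))
            (PySem.Dict.empty : PySem.Dict String Int))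
        = (wordTriples.map Prod.fst).foldl (fun d k => d.insert k (0 : Int))
          ((wordPairs.map Prod.fst).foldl (fun d k => d.insert k (0 : Int))
            (PySem.Dict.empty : PySem.Dict String Int)) :=
        (List.foldl_map (f := Prod.fst) (g := fun d k => d.insert k (0 : Int))
          (l := wordTriples)
          (init := (wordPairs.map Prod.fst).foldl (fun d k => d.insert k (0 : Int))
            (PySem.Dict.empty : PySem.Dict String Int))).symm
    rw [h1, h2, ← List.foldl_append,
      items_foldl_insert_zero _ _ (by intro p hp; simp [PySem.Dict.empty] at hp)]
    simp [PySem.Dict.empty]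
  unfold buildTopicCounts buildTopicCounts_alt
  simp only [] at hkeys hnames hdict ⊢
  simp only [hkeys, hnames, hdict]

-- ===== VERDICT (by name: the statement is the Claim_ definition above) =====
theorem buildTopicCounts_spec : Claim_equal_buildTopicCounts := by
  intro discussions wordPairs wordTriples _
  exact buildTopicCounts_eq_alt discussions wordPairs wordTriples
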